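-- pv_equiv track=rewrite | github.com/cdelbs/coursework | software_engineering/Fish/Other/coords.py | board_to_teacher
-- ===== SOURCE A (Python) =====
-- from typing import List, Sequence, Tuple
--
-- def band_start_col(row2_dh: int) -> int:
--     """First valid DH column in this band. Equals row2_dh % 2."""
--     return row2_dh & 1
--
-- def board_to_teacher(engine_grid: List[List[int]]) -> List[List[int]]:
--     """
--     Convert a rectangular engine fish grid into ragged teacher rows.
--     Produces one band for each row2_dh, then trims trailing all-zero bands.
--     """
--     if not engine_grid:
--         return []
--     rows = len(engine_grid)
--     cols = len(engine_grid[0])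
--     teacher: List[List[int]] = []
--     for row2_dh in range(2 * rows):
--         start = band_start_col(row2_dh)
--         max_idx = (cols - 1 - start) // 2 if cols > start else -1
--         band = [0] * (max_idx + 1) if max_idx >= 0 else []
--         for col in range(start, cols, 2):
--             row = (row2_dh - (col & 1)) // 2
--             if 0 <= row < rows:
--                 idx = (col - start) // 2
--                 band[idx] = engine_grid[row][col]
--         teacher.append(band)
--     while teacher and (not teacher[-1] or all(v == 0 for v in teacher[-1])):
--         teacher.pop()
--     return teacher
-- ===== SOURCE B (Python) =====
-- from typing import List
--
-- def board_to_teacher(engine_grid: List[List[int]]) -> List[List[int]]: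
--     """Emit two strided bands (even cols, odd cols) per grid row, then drop trailing all-zero bands."""
--     if not engine_grid:
--         return []
--     cols = len(engine_grid[0])
--     teacher: List[List[int]] = []
--     for row in engine_grid:
--         teacher.append([row[c] for c in range(0, cols, 2)])
--         teacher.append([row[c] for c in range(1, cols, 2)])
--     n = len(teacher)
--     while n > 0 and all(v == 0 for v in teacher[n - 1]):
--         n -= 1
--     return teacher[:n]
-- ===== Notes on version B (the rewrite author's own statement) =====
-- stated objective: simpler
-- what changed: Replaces A's loop over 2*rows virtual band indices with parity-to-row arithmetic and in-place writes into a preallocated zero band by a direct per-row emission of the even-column and odd-column bands via strided range comprehensions, and replaces the pop-loop trim by computing the kept prefix length; Pre_ excludes ragged grids with a row shorter than the first row, on which both implementations raise IndexError.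
import Mathlib
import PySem

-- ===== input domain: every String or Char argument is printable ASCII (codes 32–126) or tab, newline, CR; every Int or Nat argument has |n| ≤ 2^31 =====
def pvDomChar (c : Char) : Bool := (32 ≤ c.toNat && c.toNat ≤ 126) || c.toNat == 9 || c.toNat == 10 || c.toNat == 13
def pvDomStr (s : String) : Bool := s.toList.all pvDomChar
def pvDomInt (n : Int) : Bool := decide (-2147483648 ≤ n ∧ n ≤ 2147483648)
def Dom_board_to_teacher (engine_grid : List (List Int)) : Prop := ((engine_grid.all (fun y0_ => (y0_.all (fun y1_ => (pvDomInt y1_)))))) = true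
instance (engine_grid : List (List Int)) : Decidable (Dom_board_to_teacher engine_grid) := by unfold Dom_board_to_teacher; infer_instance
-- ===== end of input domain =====

-- B emits the even-column and odd-column bands directly per grid row and trims by computing the
-- kept prefix length, instead of A's 2*rows virtual-band loop with parity arithmetic and a pop loop.

-- ===== PORT A =====
def band_start_col (row2_dh : Int) : Int := PySem.Int.band row2_dh 1

-- while teacher and (not teacher[-1] or all(v == 0 for v in teacher[-1])): teacher.pop()
-- (an empty last band also satisfies List.all, matching Python's 'not teacher[-1] or all …')
def pvTrimA (t : List (List Int)) : List (List Int) :=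
  match h : t.getLast? with
  | none => t
  | some last => if last.all (fun v => v == 0) then pvTrimA t.dropLast else t
termination_by t.length
decreasing_by
  have : t ≠ [] := by intro he; simp [he] at h
  simpa [List.length_dropLast] using Nat.sub_lt (List.length_pos_iff.mpr this) one_pos

def board_to_teacher (engine_grid : List (List Int)) : List (List Int) :=
  if engine_grid = [] then []
  else
    let rows : Int := engine_grid.length
    let cols : Int := (PySem.List.pyGetD engine_grid 0 []).length
    let teacher : List (List Int) :=
      (PySem.List.pyRange 0 (2 * rows) 1).foldl (fun teacher row2_dh =>
        let start := band_start_col row2_dh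
        let max_idx : Int := if cols > start then PySem.Int.floordiv (cols - 1 - start) 2 else -1
        let band : List Int := if max_idx ≥ 0 then List.replicate (max_idx + 1).toNat 0 else []
        let band := (PySem.List.pyRange start cols 2).foldl (fun band col =>
          let row := PySem.Int.floordiv (row2_dh - PySem.Int.band col 1) 2
          if 0 ≤ row ∧ row < rows then
            let idx := PySem.Int.floordiv (col - start) 2
            PySem.List.pySetD band idx (PySem.List.pyGetD (PySem.List.pyGetD engine_grid row []) col 0)
          else band) band
        teacher ++ [band]) []
    pvTrimA teacher

-- ===== PORT B =====
-- n = len(teacher); while n > 0 and all(v == 0 for v in teacher[n-1]): n -= 1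
def pvTrimLen (t : List (List Int)) : Nat → Nat
  | 0 => 0
  | n + 1 => if (t.getD n []).all (fun v => v == 0) then pvTrimLen t n else n + 1

def board_to_teacher_alt (engine_grid : List (List Int)) : List (List Int) :=
  match engine_grid with
  | [] => []
  | r0 :: _ =>
    let cols : Int := r0.length
    let teacher : List (List Int) :=
      engine_grid.foldl (fun teacher row =>
        teacher ++ [(PySem.List.pyRange 0 cols 2).map (fun c => PySem.List.pyGetD row c 0),
                    (PySem.List.pyRange 1 cols 2).map (fun c => PySem.List.pyGetD row c 0)]) []
    PySem.List.slice teacher none (some (pvTrimLen teacher teacher.length : Int))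

-- ===== PRECONDITION & SPEC =====
-- Pre_ excludes exactly the ragged grids in which some row is shorter than the first row:
-- there Python A (and B) raises IndexError on engine_grid[row][col].
def Pre_board_to_teacher (engine_grid : List (List Int)) : Prop :=
  ∀ r ∈ engine_grid, (engine_grid.headI).length ≤ r.length
instance (engine_grid : List (List Int)) : Decidable (Pre_board_to_teacher engine_grid) := by
  unfold Pre_board_to_teacher; infer_instance

def pvWitness_board_to_teacher : List (List Int) := [[1, 0, 2], [0, 0, 0]]

def Spec_board_to_teacher (engine_grid : List (List Int)) (out : List (List Int)) : Prop := out = board_to_teacher_alt engine_grid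
instance (engine_grid : List (List Int)) (out : List (List Int)) : Decidable (Spec_board_to_teacher engine_grid out) := by unfold Spec_board_to_teacher; infer_instance

-- ===== CLAIM (what is proved, stated in full; the proofs are below) =====
def Claim_equal_board_to_teacher : Prop := ∀ (engine_grid : List (List Int)), Dom_board_to_teacher engine_grid → Pre_board_to_teacher engine_grid → Spec_board_to_teacher engine_grid (board_to_teacher engine_grid)

-- ===== LEMMAS AND PROOFS =====

-- trim agreement: A's pop loop equals taking the prefix of length pvTrimLen
theorem pvTrimLen_dropLast (t : List (List Int)) :
    ∀ n ≤ t.length - 1, pvTrimLen t n = pvTrimLen t.dropLast n := by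
  intro n hn
  induction n with
  | zero => simp [pvTrimLen]
  | succ m ih =>
    have hm : m < t.length - 1 := by omega
    have hEq : t.dropLast[m]? = t[m]? := by
      rw [List.getElem?_dropLast]; simp [hm]
    simp [pvTrimLen, List.getD, hEq, ih (by omega)]

theorem pvTrimA_eq_take (t : List (List Int)) :
    pvTrimA t = t.take (pvTrimLen t t.length) := by
  induction t using pvTrimA.induct with
  | case1 t h =>
    have : t = [] := by simpa using h
    subst this; simp [pvTrimA, pvTrimLen]
  | case2 t last h hall ih =>
    have hne : t ≠ [] := by intro he; simp [he] at h
    have hlen : t.length = (t.length - 1) + 1 := by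
      have := List.length_pos_iff.mpr hne; omega
    have hgetD : t.getD (t.length - 1) [] = last := by
      have h2 : t[t.length - 1]? = some last := by rw [← List.getLast?_eq_getElem?]; exact h
      simp [List.getD, h2]
    rw [pvTrimA, h]
    simp only [hall, if_true]
    rw [ih, hlen, pvTrimLen, hgetD, hall, if_pos rfl]
    rw [pvTrimLen_dropLast t (t.length - 1) (le_refl _)]
    have htake : ∀ k ≤ t.length - 1, t.take k = t.dropLast.take k := by
      intro k hk
      rw [List.dropLast_eq_take, List.take_take]
      rw [Nat.min_eq_left hk]
    rw [List.length_dropLast] at *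
    have hle : pvTrimLen t.dropLast (t.length - 1) ≤ t.length - 1 := by
      have : ∀ (s : List (List Int)) (n : Nat), pvTrimLen s n ≤ n := by
        intro s n; induction n with
        | zero => simp [pvTrimLen]
        | succ m ih2 =>
            rw [pvTrimLen]
            split
            · exact Nat.le_succ_of_le ih2
            · exact le_refl _
      exact this _ _
    rw [htake _ hle]
  | case3 t last h hall =>
    have hne : t ≠ [] := by intro he; simp [he] at h
    have hlen : t.length = (t.length - 1) + 1 := by
      have := List.length_pos_iff.mpr hne; omega
    have hgetD : t.getD (t.length - 1) [] = last := by
      have h2 : t[t.length - 1]? = some last := by rw [← List.getLast?_eq_getElem?]; exact h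
      simp [List.getD, h2]
    rw [pvTrimA, h]
    simp only [hall]
    rw [hlen, pvTrimLen, hgetD, if_neg hall]
    simp [← hlen]

-- writing f k at position k for k = 0..n-1 into a buffer fills its first n slots
theorem pv_foldl_set_range {α : Type} (f : Nat → α) :
    ∀ (n : Nat) (L : List α), n ≤ L.length →
      (List.range n).foldl (fun b k => b.set k (f k)) L = (List.range n).map f ++ L.drop n := by
  intro n
  induction n with
  | zero => simp
  | succ m ih =>
    intro L hL
    rw [List.range_succ, List.foldl_append, ih L (by omega)]
    simp only [List.foldl_cons, List.foldl_nil, List.map_append, List.map_cons, List.map_nil]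
    rw [List.set_append]
    simp only [List.length_map, List.length_range, Nat.lt_irrefl, if_false, Nat.sub_self]
    rw [List.drop_eq_getElem_cons (i := m) (l := L) (by omega), List.set_cons_zero]
    simp

-- A's band for virtual index 2*i+start equals the strided comprehension over row g[i]
theorem pv_band_eq (g : List (List Int)) (rows cols start row2_dh : Int) (i : Nat)
    (hrows : rows = g.length) (hi : i < g.length)
    (hs : start = 0 ∨ start = 1) (hr2 : row2_dh = 2 * i + start) :
    ((PySem.List.pyRange start cols 2).foldl (fun band col =>
        let row := PySem.Int.floordiv (row2_dh - PySem.Int.band col 1) 2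
        if 0 ≤ row ∧ row < rows then
          let idx := PySem.Int.floordiv (col - start) 2
          PySem.List.pySetD band idx (PySem.List.pyGetD (PySem.List.pyGetD g row []) col 0)
        else band)
      (if (if cols > start then PySem.Int.floordiv (cols - 1 - start) 2 else -1) ≥ 0 then
        List.replicate ((if cols > start then PySem.Int.floordiv (cols - 1 - start) 2 else -1) + 1).toNat (0:Int)
       else []))
    = (PySem.List.pyRange start cols 2).map (fun c => PySem.List.pyGetD (g.getD i []) c 0) := by
  by_cases hlt : start < cols
  · have h2 : (0:Int) < 2 := by norm_num
    rw [PySem.List.pyRange_of_pos start cols h2]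
    simp only [if_pos hlt, gt_iff_lt]
    have hmx : PySem.Int.floordiv (cols - 1 - start) 2 ≥ 0 := by
      rw [PySem.Int.floordiv_eq_ediv_of_pos h2]; omega
    rw [if_pos hmx]
    have hN : ((cols - start + 2 - 1) / 2).toNat = (PySem.Int.floordiv (cols - 1 - start) 2 + 1).toNat := by
      rw [PySem.Int.floordiv_eq_ediv_of_pos h2]; omega
    rw [List.foldl_map, List.map_map]
    have hfun : (fun (band : List Int) (k : Nat) =>
        (fun band col =>
          let row := PySem.Int.floordiv (row2_dh - PySem.Int.band col 1) 2
          if 0 ≤ row ∧ row < rows then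
            let idx := PySem.Int.floordiv (col - start) 2
            PySem.List.pySetD band idx (PySem.List.pyGetD (PySem.List.pyGetD g row []) col 0)
          else band) band (start + 2 * (k:Int)))
        = fun (band : List Int) (k : Nat) => band.set k (PySem.List.pyGetD (g.getD i []) (start + 2 * (k:Int)) 0) := by
      funext band k
      have hband : PySem.Int.band (start + 2 * (k:Int)) 1 = start := by
        rw [PySem.Int.band_one, PySem.Int.mod_eq_emod_of_pos (by norm_num)]
        omega
      simp only [hband]
      have hrow : PySem.Int.floordiv (row2_dh - start) 2 = (i:Int) := by
        rw [PySem.Int.floordiv_eq_ediv_of_pos (by norm_num), hr2]; omega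
      rw [hrow]
      have hcond : (0 ≤ (i:Int) ∧ (i:Int) < rows) := by
        constructor <;> [positivity; (rw [hrows]; exact_mod_cast hi)]
      rw [if_pos hcond]
      have hidx : PySem.Int.floordiv (start + 2 * (k:Int) - start) 2 = (k:Int) := by
        rw [PySem.Int.floordiv_eq_ediv_of_pos (by norm_num)]; omega
      rw [hidx, PySem.List.pyGetD_natCast, PySem.List.pySetD_natCast]
    rw [hfun, pv_foldl_set_range _ _ _ (by simp [hN])]
    simp [hN]
  · have hnil : PySem.List.pyRange start cols 2 = [] := by
      rw [PySem.List.pyRange_of_pos start cols (by norm_num)]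
      simp [hlt]
    rw [hnil]
    have hle : cols ≤ start := le_of_not_gt hlt
    simp only [List.foldl_nil, List.map_nil]
    rw [if_neg (by omega : ¬ (cols > start))]
    norm_num

-- splitting range(2n) into consecutive pairs
theorem pv_range_two_flatMap {α : Type} (h : Nat → α) :
    ∀ (n : Nat), (List.range (2 * n)).map h
      = (List.range n).flatMap (fun i => [h (2 * i), h (2 * i + 1)]) := by
  intro n
  induction n with
  | zero => simp
  | succ m ih =>
    have : 2 * (m + 1) = (2 * m + 1) + 1 := by omega
    rw [this, List.range_succ, List.range_succ, List.range_succ]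
    simp only [List.map_append, List.map_cons, List.map_nil, List.flatMap_append, ih]
    simp

-- a list is the range-indexed map of its getD's
theorem pv_getD_range (g : List (List Int)) :
    (List.range g.length).map (fun i => g.getD i []) = g := by
  apply List.ext_getElem
  · simp
  · intro i h1 h2
    simp [List.getD, h2]

-- ===== VERDICT (by name: the statement is the Claim_ definition above) =====
-- trim glue: A's pop loop vs B's slice of the kept prefix, on equal teacher lists
theorem pv_glue (T1 T2 : List (List Int)) (h : T1 = T2) :
    pvTrimA T1 = PySem.List.slice T2 none (some ((pvTrimLen T2 T2.length : Nat) : Int)) := by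
  subst h
  rw [pvTrimA_eq_take, PySem.List.slice_to_natCast]

theorem pv_main (g : List (List Int)) :
    board_to_teacher g = board_to_teacher_alt g := by
  cases g with
  | nil => rfl
  | cons r0 rest =>
    simp only [board_to_teacher, board_to_teacher_alt, PySem.List.pyGetD_zero_cons]
    rw [if_neg (by simp : ¬ (r0 :: rest = []))]
    apply pv_glue
    rw [PySem.List.foldl_append_singleton_eq_map, PySem.List.foldl_append_eq_flatMap]
    simp only [List.nil_append]
    rw [PySem.List.pyRange_one, List.map_map]
    have hn : ((2 * ((r0 :: rest).length : Int) - 0)).toNat = 2 * (r0 :: rest).length := by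
      omega
    rw [hn, pv_range_two_flatMap]
    conv_rhs => rw [← pv_getD_range (r0 :: rest)]
    rw [List.flatMap_map]
    apply List.flatMap_congr
    intro i hi
    rw [List.mem_range] at hi
    have hs0 : band_start_col ((0:Int) + ((2 * i : Nat) : Int)) = 0 := by
      simp only [band_start_col, PySem.Int.band_one,
        PySem.Int.mod_eq_emod_of_pos (by norm_num : (0:Int) < 2)]
      push_cast; omega
    have hs1 : band_start_col ((0:Int) + ((2 * i + 1 : Nat) : Int)) = 1 := by
      simp only [band_start_col, PySem.Int.band_one,
        PySem.Int.mod_eq_emod_of_pos (by norm_num : (0:Int) < 2)]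
      push_cast; omega
    simp only [Function.comp, hs0, hs1]
    congr 1
    · exact pv_band_eq (r0 :: rest) _ _ 0 _ i rfl hi (Or.inl rfl) (by push_cast; ring)
    · congr 1
      exact pv_band_eq (r0 :: rest) _ _ 1 _ i rfl hi (Or.inr rfl) (by push_cast; ring)

theorem board_to_teacher_spec : Claim_equal_board_to_teacher := by
  intro engine_grid _ _
  exact pv_main engine_grid
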